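-- pv_equiv track=rewrite | github.com/ishaan-bit/leo | enrichment-worker/features/pipeline.py | _build_user_timelines
-- ===== SOURCE A (Python) =====
-- from typing import List, Dict, Optional
-- from collections import defaultdict
--
-- def _build_user_timelines(items: List[Dict]) -> Dict[str, List[Dict]]:
--     """
--     Build user timelines from items.
--
--     Returns:
--         Dict mapping owner_id to list of items
--     """
--     timelines = defaultdict(list)
--     for item in items:
--         user_id = item.get("owner_id")
--         if user_id:
--             timelines[user_id].append(item)
--
--     # Sort each timeline by timestamp
--     for user_id in timelines:
--         timelines[user_id] = sorted(
--             timelines[user_id],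
--             key=lambda x: x.get("ts", "")
--         )
--
--     return dict(timelines)
-- ===== SOURCE B (Python) =====
-- from typing import List, Dict
--
-- def _build_user_timelines(items: List[Dict]) -> Dict[str, List[Dict]]:
--     # One global stable sort by ts, then one filter per owner (owners in
--     # first-occurrence order, as dict insertion order gives in A).
--     order = list(dict.fromkeys(it.get("owner_id") for it in items if it.get("owner_id")))
--     ordered = sorted(items, key=lambda x: x.get("ts", ""))
--     return {u: [it for it in ordered if it.get("owner_id") == u] for u in order}
-- ===== Notes on version B (the rewrite author's own statement) =====
-- stated objective: simpler
-- what changed: Instead of accumulating per-owner lists in a defaultdict and then sorting each group, B sorts the whole list once by ts (stable) and builds each owner's timeline by a single filter over the sorted list, with owners deduplicated in first-occurrence order.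
import Mathlib
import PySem

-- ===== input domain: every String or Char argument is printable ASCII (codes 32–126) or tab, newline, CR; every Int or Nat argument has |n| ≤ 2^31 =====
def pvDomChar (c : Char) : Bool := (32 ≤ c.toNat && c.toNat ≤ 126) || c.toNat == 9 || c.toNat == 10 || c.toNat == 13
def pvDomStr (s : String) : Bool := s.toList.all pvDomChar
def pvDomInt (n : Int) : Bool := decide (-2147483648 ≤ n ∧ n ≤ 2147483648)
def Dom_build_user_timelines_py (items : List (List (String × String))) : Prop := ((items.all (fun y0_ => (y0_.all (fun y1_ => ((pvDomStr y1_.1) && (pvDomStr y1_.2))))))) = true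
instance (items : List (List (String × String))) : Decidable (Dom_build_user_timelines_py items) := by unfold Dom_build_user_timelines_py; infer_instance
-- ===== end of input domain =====

-- B replaces A's defaultdict-then-sort-each-group with one global stable sort by ts plus a
-- filter per owner; the return values are proved identical (neither version mutates its argument).

-- shared helpers: item.get("owner_id") and item.get("ts", "") (first-match association lookup)
def pvOwn (item : List (String × String)) : Option String := (PySem.Dict.mk item).get? "owner_id"
def pvTs (item : List (String × String)) : String := (PySem.Dict.mk item).getD "ts" ""

-- ===== PORT A =====
def build_user_timelines_py (items : List (List (String × String))) : List (String × List (List (String × String))) :=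
  -- timelines = defaultdict(list); for item in items: if item.get("owner_id"): append
  let timelines : PySem.Dict String (List (List (String × String))) :=
    items.foldl (fun tl item =>
      match pvOwn item with
      | some uid => if uid = "" then tl else tl.modify uid [] (· ++ [item])
      | none => tl) PySem.Dict.empty
  -- for user_id in timelines: timelines[user_id] = sorted(timelines[user_id], key=ts)
  let timelines := timelines.keys.foldl (fun tl uid =>
      tl.insert uid (PySem.List.sorted (tl.getD uid []) (fun x => pvTs x))) timelines
  timelines.items

-- ===== PORT B =====
def build_user_timelines_py_alt (items : List (List (String × String))) : List (String × List (List (String × String))) :=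
  -- order = list(dict.fromkeys(it.get("owner_id") for it in items if it.get("owner_id")))
  let order := PySem.List.dedup ((items.filter (fun it =>
      match pvOwn it with | some s => s ≠ "" | none => false)).map (fun it => (pvOwn it).getD ""))
  -- ordered = sorted(items, key=lambda x: x.get("ts", ""))
  let ordered := PySem.List.sorted items (fun x => pvTs x)
  -- {u: [it for it in ordered if it.get("owner_id") == u] for u in order}
  order.map (fun u => (u, ordered.filter (fun it => pvOwn it == some u)))

-- ===== PRECONDITION & SPEC =====
def Spec_build_user_timelines_py (items : List (List (String × String))) (out : List (String × List (List (String × String)))) : Prop := out = build_user_timelines_py_alt items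
instance (items : List (List (String × String))) (out : List (String × List (List (String × String)))) : Decidable (Spec_build_user_timelines_py items out) := by unfold Spec_build_user_timelines_py; infer_instance

-- ===== CLAIM (what is proved, stated in full; the proofs are below) =====
def Claim_equal_build_user_timelines_py : Prop := ∀ (items : List (List (String × String))), Dom_build_user_timelines_py items → Spec_build_user_timelines_py items (build_user_timelines_py items)

-- ===== LEMMAS AND PROOFS =====

-- if x compares before every element, insertBy puts it in front
theorem pv_insertBy_front {α : Type} (b : α → α → Bool) (x : α) (ys : List α)
    (h : ∀ z ∈ ys, b x z = true) : PySem.List.insertBy b x ys = x :: ys := by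
  cases ys with
  | nil => simp [PySem.List.insertBy]
  | cons z r => simp [PySem.List.insertBy, h z (List.mem_cons_self)]

-- insertBy with the key comparator keeps the accumulator sorted
theorem pv_pairwise_insertBy {α κ : Type} [LinearOrder κ] (key : α → κ) (x : α) (ys : List α)
    (h : ys.Pairwise (fun a c => key a ≤ key c)) :
    (PySem.List.insertBy (fun a c => decide (key a < key c)) x ys).Pairwise
      (fun a c => key a ≤ key c) := by
  induction ys with
  | nil => simp [PySem.List.insertBy]
  | cons y t ih =>
    rcases List.pairwise_cons.mp h with ⟨hy, ht⟩
    by_cases hb : key x < key y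
    · simp only [PySem.List.insertBy, decide_eq_true_eq, hb, if_pos]
      exact List.pairwise_cons.mpr ⟨by
        intro z hz
        rcases List.mem_cons.mp hz with rfl | hz
        · exact le_of_lt hb
        · exact le_of_lt (lt_of_lt_of_le hb (hy z hz)), h⟩
    · simp only [PySem.List.insertBy, decide_eq_true_eq, hb, if_neg, not_false_iff]
      refine List.pairwise_cons.mpr ⟨?_, ih ht⟩
      intro z hz
      rcases (PySem.List.mem_insertBy _ _ _ _).mp hz with rfl | hz
      · exact le_of_not_gt hb
      · exact hy z hz

-- filter commutes with a stable insertion into a key-sorted accumulator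
theorem pv_filter_insertBy {α κ : Type} [LinearOrder κ] (p : α → Bool) (key : α → κ)
    (x : α) (ys : List α) (h : ys.Pairwise (fun a c => key a ≤ key c)) :
    (PySem.List.insertBy (fun a c => decide (key a < key c)) x ys).filter p
      = if p x then PySem.List.insertBy (fun a c => decide (key a < key c)) x (ys.filter p)
        else ys.filter p := by
  induction ys with
  | nil =>
    by_cases hp : p x <;> simp [PySem.List.insertBy, hp]
  | cons y t ih =>
    rcases List.pairwise_cons.mp h with ⟨hy, ht⟩
    by_cases hb : key x < key y
    · simp only [PySem.List.insertBy, decide_eq_true_eq, hb, if_pos]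
      by_cases hp : p x <;> by_cases hq : p y <;>
        simp only [List.filter_cons, hp, hq, if_pos, if_neg, Bool.false_eq_true,
          not_false_iff]
      · rw [pv_insertBy_front]
        intro z hz
        rcases List.mem_cons.mp hz with rfl | hz
        · simpa using hb
        · simpa using lt_of_lt_of_le hb (hy z (List.mem_of_mem_filter hz))
      · rw [pv_insertBy_front]
        intro z hz
        exact by simpa using lt_of_lt_of_le hb (hy z (List.mem_of_mem_filter hz))
    · simp only [PySem.List.insertBy, decide_eq_true_eq, hb, if_neg, not_false_iff]
      by_cases hp : p x <;> by_cases hq : p y <;>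
        simp only [List.filter_cons, hp, hq, ih ht, if_pos, if_neg, Bool.false_eq_true,
          not_false_iff, PySem.List.insertBy, decide_eq_true_eq, hb]

-- hence filter commutes with the whole insertion-sort fold
theorem pv_filter_foldl_insertBy {α κ : Type} [LinearOrder κ] (p : α → Bool) (key : α → κ)
    (xs : List α) (acc : List α) (h : acc.Pairwise (fun a c => key a ≤ key c)) :
    (xs.foldl (fun a x => PySem.List.insertBy (fun a c => decide (key a < key c)) x a) acc).filter p
      = (xs.filter p).foldl (fun a x => PySem.List.insertBy (fun a c => decide (key a < key c)) x a)
          (acc.filter p) := by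
  induction xs generalizing acc with
  | nil => simp
  | cons x t ih =>
    rw [List.foldl_cons, ih _ (pv_pairwise_insertBy key x acc h),
      pv_filter_insertBy p key x acc h, List.filter_cons]
    by_cases hp : p x <;> simp [hp]

-- a stable sort restricted to the kept elements is the sort of the kept elements
theorem pv_filter_sorted {α κ : Type} [LinearOrder κ] (p : α → Bool) (key : α → κ) (xs : List α) :
    (PySem.List.sorted xs key).filter p = PySem.List.sorted (xs.filter p) key := by
  rw [PySem.List.sorted_eq_foldl_insertBy, PySem.List.sorted_eq_foldl_insertBy,
    pv_filter_foldl_insertBy p key xs [] (List.Pairwise.nil)]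
  rfl

-- the re-sorting loop over the dict's keys: inserts at other keys do not touch getD u
theorem pv_getD_foldl_insert_not_mem {κ ν : Type} [BEq κ] [LawfulBEq κ]
    (g : ν → ν) (dflt : ν) (l : List κ) (d : PySem.Dict κ ν) (u : κ) (hu : u ∉ l) :
    (l.foldl (fun tl uid => tl.insert uid (g (tl.getD uid dflt))) d).getD u dflt
      = d.getD u dflt := by
  induction l generalizing d with
  | nil => rfl
  | cons x t ih =>
    simp only [List.mem_cons, not_or] at hu
    rw [List.foldl_cons, ih _ hu.2, PySem.Dict.getD_insert_of_ne _ _ _ hu.1]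

theorem pv_getD_foldl_insert_mem {κ ν : Type} [BEq κ] [LawfulBEq κ]
    (g : ν → ν) (dflt : ν) (l : List κ) (d : PySem.Dict κ ν) (u : κ)
    (hnd : l.Nodup) (hu : u ∈ l) :
    (l.foldl (fun tl uid => tl.insert uid (g (tl.getD uid dflt))) d).getD u dflt
      = g (d.getD u dflt) := by
  induction l generalizing d with
  | nil => cases hu
  | cons x t ih =>
    rw [List.foldl_cons]
    rcases List.mem_cons.mp hu with h | h
    · subst h
      rw [pv_getD_foldl_insert_not_mem _ _ _ _ _ (List.nodup_cons.mp hnd).1,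
        PySem.Dict.getD_insert_self]
    · rw [ih _ (List.nodup_cons.mp hnd).2 h,
        PySem.Dict.getD_insert_of_ne _ _ _ (fun he => (List.nodup_cons.mp hnd).1 (by rw [← he]; exact h))]

-- updating a set with elements it already has changes nothing
theorem pv_update_self {α : Type} [BEq α] [LawfulBEq α] (s : PySem.Set α) (xs : List α)
    (h : ∀ x ∈ xs, x ∈ s) : s.update xs = s := by
  rw [PySem.Set.update_eq_append_filter]
  have hnil : List.filter (fun y => !s.contains y) (PySem.Set.ofList xs) = [] := by
    rw [List.filter_eq_nil_iff]
    intro y hy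
    have hm : y ∈ s := h y ((PySem.Set.mem_ofList _ _).mp hy)
    simp [PySem.Set.contains, hm]
  rw [hnil, List.append_nil]

def pvTruthy (it : List (String × String)) : Bool :=
  match pvOwn it with | some s => s ≠ "" | none => false

theorem pv_main (items : List (List (String × String))) :
    build_user_timelines_py items = build_user_timelines_py_alt items := by
  unfold build_user_timelines_py build_user_timelines_py_alt
  -- the grouping loop is a fold over the truthy items keyed by their owner
  have hstep : (fun (tl : PySem.Dict String (List (List (String × String)))) item =>
      match pvOwn item with
      | some uid => if uid = "" then tl else tl.modify uid [] (· ++ [item])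
      | none => tl)
      = (fun tl item => if pvTruthy item then tl.modify ((pvOwn item).getD "") [] (· ++ [item]) else tl) := by
    funext tl item
    unfold pvTruthy
    cases h : pvOwn item with
    | none => simp
    | some s => by_cases hs : s = "" <;> simp [hs]
  rw [hstep, PySem.List.foldl_if_eq_foldl_filter]
  set F := items.filter pvTruthy with hF
  set d1 : PySem.Dict String (List (List (String × String))) :=
    F.foldl (fun tl item => tl.modify ((pvOwn item).getD "") [] (· ++ [item])) PySem.Dict.empty with hd1
  have hkeys : d1.keys = PySem.Set.ofList (F.map (fun it => (pvOwn it).getD "")) := by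
    rw [hd1, PySem.Dict.keys_foldl_modify_key F (fun it => (pvOwn it).getD "") []
      (fun _ item => (· ++ [item])) PySem.Dict.empty]
    simp [PySem.Dict.keys_empty, PySem.Set.update_eq_append_filter, PySem.Set.contains]
  have hndk : d1.keys.Nodup := by
    rw [hkeys]; exact PySem.Set.nodup_ofList _
  have hgetD : ∀ u : String, d1.getD u []
      = F.filter (fun it => (pvOwn it).getD "" == u) := by
    intro u
    rw [hd1, ← List.foldl_map (f := fun it => (((pvOwn it).getD "" : String), it))
      (g := fun (tl : PySem.Dict String (List (List (String × String)))) p =>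
        tl.modify p.1 [] (· ++ [p.2])),
      PySem.Dict.getD_foldl_modify_append]
    simp [List.filter_map, Function.comp_def]
  -- the second loop: same keys, each value sorted
  set step := fun (tl : PySem.Dict String (List (List (String × String)))) uid =>
      tl.insert uid (PySem.List.sorted (tl.getD uid []) (fun x => pvTs x)) with hstep2
  set d2 := d1.keys.foldl step d1 with hd2
  have hkeys2 : d2.keys = d1.keys := by
    rw [hd2, hstep2, PySem.Dict.keys_foldl_insert d1.keys
      (fun tl uid => PySem.List.sorted (tl.getD uid []) (fun x => pvTs x)) d1]
    exact pv_update_self _ _ (fun x hx => hx)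
  have hitems : d2.items = d2.keys.map (fun k => (k, d2.getD k [])) :=
    PySem.Dict.items_eq_map_keys d2 (by rw [hkeys2]; exact hndk) []
  have hgetD2 : ∀ u ∈ d1.keys, d2.getD u []
      = PySem.List.sorted (d1.getD u []) (fun x => pvTs x) := by
    intro u hu
    exact pv_getD_foldl_insert_mem (fun v => PySem.List.sorted v (fun x => pvTs x)) [] _ d1 u hndk hu
  -- B's owner order is exactly d1's key list
  have horder : PySem.List.dedup ((items.filter (fun it =>
        match pvOwn it with | some s => s ≠ "" | none => false)).map (fun it => (pvOwn it).getD ""))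
      = d1.keys := by
    rw [hkeys, PySem.List.dedup_eq_ofList, hF]
    rfl
  rw [hitems, hkeys2, horder]
  refine List.map_congr_left ?_
  intro u hu
  -- u is a truthy owner, so u ≠ ""
  have hune : u ≠ "" := by
    rw [hkeys] at hu
    rcases List.mem_map.mp ((PySem.Set.mem_ofList _ _).mp hu) with ⟨it, hit, hequ⟩
    have htr : pvTruthy it = true := List.of_mem_filter hit
    unfold pvTruthy at htr
    cases h : pvOwn it with
    | none => rw [h] at htr; cases htr
    | some s =>
      rw [h] at htr hequ
      simp only [Option.getD_some] at hequ
      subst hequ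
      simpa using htr
  rw [hgetD2 u hu, hgetD u]
  refine congrArg (fun l => (u, l)) ?_
  rw [pv_filter_sorted (fun it => pvOwn it == some u) (fun x => pvTs x) items]
  congr 1
  rw [hF, List.filter_filter]
  refine List.filter_congr ?_
  intro it _
  unfold pvTruthy
  cases h : pvOwn it with
  | none => simp
  | some s =>
    by_cases hsu : s = u
    · subst hsu; simp [hune]
    · simp [hsu, Ne.symm]

-- ===== VERDICT (by name: the statement is the Claim_ definition above) =====
theorem build_user_timelines_py_spec : Claim_equal_build_user_timelines_py := by
  intro items _
  unfold Spec_build_user_timelines_py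
  exact pv_main items
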